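-- pv_equiv track=rewrite | github.com/aagarwal17/DATASCI-200-Introduction-to-Data-Science-Programming | midterm.py | birthday_count
-- ===== SOURCE A (Python) =====
-- def birthday_count(dates_list):
--     """Returns the total number of birthday pairs in the dates_list"""
--     date_counts = {} # Dictionary to store how many same dates there are
--     # O(n) time complexity to iterate through each person in dates_list:
--     for person in dates_list:
--         # If the birthday is already encountered, update its count/value by 1. Otherwise, set the value to 1
--         if person in date_counts:
--             date_counts[person] += 1
--         else:
--             date_counts[person] = 1
--     # This problem boils down to n choose 2, where n is the count of same birthdays for a given day, and 2 represents that we want all the pairs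
--     # Our dictionary stores birthdays with count 1, but when doing the permutation, the calculation still comes to 0
--     # n choose 2 is n!/((n-2)! 2!) = (n(n-1)(n-2)!)/((n-2)! * 2!) = n(n-1)/2! = n(n-1)/2, as I use below
--     # We then just sum these permutation values to get the pair count needed [overall O(n) time complexity]
--     return int(sum([(val)*(val-1)/2 for val in date_counts.values()]))
-- ===== SOURCE B (Python) =====
-- def birthday_count(dates_list):
--     """Returns the total number of birthday pairs in the dates_list"""
--     seen = {}
--     total = 0
--     for person in dates_list:
--         c = seen.get(person, 0)
--         total += c            # each earlier occurrence of this date forms one new pair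
--         seen[person] = c + 1
--     return total
-- ===== Notes on version B (the rewrite author's own statement) =====
-- stated objective: simpler
-- what changed: B accumulates pairs online in a single pass (each new occurrence adds the number of earlier equal dates to a running integer total), instead of building a full counter dict and then doing a second pass summing n*(n-1)/2 in float arithmetic and casting with int().
import Mathlib
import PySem

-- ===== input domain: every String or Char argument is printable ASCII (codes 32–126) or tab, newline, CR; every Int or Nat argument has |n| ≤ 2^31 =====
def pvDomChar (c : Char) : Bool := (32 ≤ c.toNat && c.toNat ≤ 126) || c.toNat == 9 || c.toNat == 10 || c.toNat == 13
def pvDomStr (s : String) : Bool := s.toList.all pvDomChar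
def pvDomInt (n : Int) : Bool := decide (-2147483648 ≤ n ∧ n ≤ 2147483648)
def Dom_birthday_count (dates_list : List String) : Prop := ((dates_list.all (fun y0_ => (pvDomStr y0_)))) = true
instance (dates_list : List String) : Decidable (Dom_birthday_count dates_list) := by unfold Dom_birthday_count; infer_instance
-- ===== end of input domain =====

-- B replaces A's counter-dict-then-second-pass n*(n-1)/2 summation by a single pass with a running
-- integer total (each occurrence adds the number of earlier equal dates); objective: simpler.

-- ===== PORT A =====
-- A's 'val*(val-1)/2' uses Python float division and int(); val*(val-1) is always even, so the
-- division is exact and Int division below computes the same value (exact up to 2^53 duplicates).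
def birthday_count (dates_list : List String) : Int :=
  let date_counts : PySem.Dict String Int :=
    dates_list.foldl
      (fun d person =>
        if d.contains person then d.insert person (d.getD person 0 + 1)
        else d.insert person 1)
      PySem.Dict.empty
  ((date_counts.values).map (fun val => val * (val - 1) / 2)).sum

-- ===== PORT B =====
def birthday_count_alt (dates_list : List String) : Int :=
  (dates_list.foldl
    (fun (st : PySem.Dict String Int × Int) person =>
      let c := st.1.getD person 0
      (st.1.insert person (c + 1), st.2 + c))
    (PySem.Dict.empty, 0)).2

-- ===== PRECONDITION & SPEC =====
def Spec_birthday_count (dates_list : List String) (out : Int) : Prop := out = birthday_count_alt dates_list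
instance (dates_list : List String) (out : Int) : Decidable (Spec_birthday_count dates_list out) := by unfold Spec_birthday_count; infer_instance

-- ===== CLAIM (what is proved, stated in full; the proofs are below) =====
def Claim_equal_birthday_count : Prop := ∀ (dates_list : List String), Dom_birthday_count dates_list → Spec_birthday_count dates_list (birthday_count dates_list)

-- ===== LEMMAS AND PROOFS =====

-- the common value both programs compute: Σ over distinct dates of C(count, 2)
def pvPairs (xs : List String) : Int :=
  ((PySem.Set.ofList xs).map
    (fun k => ((xs.count k : Int)) * ((xs.count k : Int) - 1) / 2)).sum

-- C(n+1,2) = C(n,2) + n over Int (exact division: n*(n-1) is even)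
theorem pvC_succ (n : Int) : (n + 1) * ((n + 1) - 1) / 2 = n * (n - 1) / 2 + n := by
  rw [show (n + 1) * ((n + 1) - 1) = n * (n - 1) + n * 2 by ring,
      Int.add_mul_ediv_right _ _ (by norm_num : (2 : Int) ≠ 0)]

-- bump one summand of a sum over a duplicate-free list
theorem pvSum_bump (L : List String) (f g : String → Int) (x : String) (c : Int)
    (hnd : L.Nodup) (hne : ∀ k ∈ L, k ≠ x → g k = f k) (hgx : g x = f x + c)
    (hmem : x ∈ L) : (L.map g).sum = (L.map f).sum + c := by
  induction L with
  | nil => cases hmem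
  | cons a L ih =>
    have hnd' := List.nodup_cons.mp hnd
    by_cases hax : a = x
    · subst hax
      have hmapeq : L.map g = L.map f :=
        List.map_congr_left (fun k hk => hne k (List.mem_cons_of_mem _ hk) (fun e => hnd'.1 (e ▸ hk)))
      simp only [List.map_cons, List.sum_cons, hmapeq, hgx]; ring
    · have hxL : x ∈ L := by
        rcases List.mem_cons.mp hmem with h | h
        · exact absurd h.symm hax
        · exact h
      have hrec := ih hnd'.2 (fun k hk => hne k (List.mem_cons_of_mem _ hk)) hxL
      simp only [List.map_cons, List.sum_cons, hrec, hne a (by simp) hax]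
      ring

-- appending one element adds count-many pairs
theorem pvPairs_append (xs : List String) (x : String) :
    pvPairs (xs ++ [x]) = pvPairs xs + (xs.count x : Int) := by
  unfold pvPairs
  rw [PySem.Set.ofList_append_singleton]
  by_cases hx : x ∈ xs
  · rw [PySem.Set.add_of_mem ((PySem.Set.mem_ofList xs x).mpr hx)]
    apply pvSum_bump _ _ _ x _ (PySem.Set.nodup_ofList xs)
    · intro k hk hne
      have h0 : List.count k [x] = 0 := List.count_eq_zero.mpr (by simp [hne])
      simp [List.count_append, h0]
    · have h1 : List.count x [x] = 1 := by simp
      rw [List.count_append, h1, Nat.cast_add, Nat.cast_one]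
      exact pvC_succ _
    · exact (PySem.Set.mem_ofList xs x).mpr hx
  · rw [PySem.Set.add_of_not_mem (fun h => hx ((PySem.Set.mem_ofList xs x).mp h))]
    have hmap : (PySem.Set.ofList xs).map
        (fun k => (((xs ++ [x]).count k : Int)) * (((xs ++ [x]).count k : Int) - 1) / 2)
        = (PySem.Set.ofList xs).map
        (fun k => ((xs.count k : Int)) * ((xs.count k : Int) - 1) / 2) := by
      apply List.map_congr_left
      intro k hk
      have hkx : k ≠ x := fun e => hx (e ▸ (PySem.Set.mem_ofList xs k).mp hk)
      have h0 : List.count k [x] = 0 := List.count_eq_zero.mpr (by simp [hkx])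
      simp [List.count_append, h0]
    have hcx : xs.count x = 0 := List.count_eq_zero.mpr hx
    rw [List.map_append, List.sum_append, hmap]
    simp [List.count_append, hcx]

-- the paired fold of B: first component is the plain counting fold
theorem pvB_fst (xs : List String) (d : PySem.Dict String Int) (t : Int) :
    (xs.foldl (fun (st : PySem.Dict String Int × Int) person =>
        let c := st.1.getD person 0
        (st.1.insert person (c + 1), st.2 + c)) (d, t)).1
      = xs.foldl (fun d x => d.insert x (d.getD x 0 + 1)) d := by
  induction xs generalizing d t with
  | nil => rfl
  | cons a xs ih => simp [List.foldl_cons, ih]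

-- B computes pvPairs
theorem pvB_eq (xs : List String) : birthday_count_alt xs = pvPairs xs := by
  unfold birthday_count_alt
  induction xs using List.reverseRecOn with
  | nil => rfl
  | append_singleton xs x ih =>
    rw [List.foldl_append]
    have h1 := pvB_fst xs PySem.Dict.empty 0
    rw [PySem.Dict.foldl_insert_getD_add_one_eq_counter] at h1
    simp only [List.foldl_cons, List.foldl_nil]
    rw [pvPairs_append]
    simp only [h1, PySem.Dict.getD_counter, ih]

-- A's branchy update is the counting fold
theorem pvA_fun :
    (fun (d : PySem.Dict String Int) person =>
        if d.contains person then d.insert person (d.getD person 0 + 1)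
        else d.insert person 1)
      = fun d x => d.insert x (d.getD x 0 + 1) := by
  funext d p
  by_cases h : d.contains p
  · rw [if_pos h]
  · have hc : d.contains p = false := by simpa using h
    rw [if_neg h, PySem.Dict.getD_of_not_contains d 0 hc]
    norm_num

-- A computes pvPairs
theorem pvA_eq (xs : List String) : birthday_count xs = pvPairs xs := by
  unfold birthday_count
  rw [pvA_fun, PySem.Dict.foldl_insert_getD_add_one_eq_counter]
  unfold pvPairs
  simp only [PySem.Dict.values, PySem.Dict.items_counter, List.map_map]
  rfl

-- ===== VERDICT (by name: the statement is the Claim_ definition above) =====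
theorem birthday_count_spec : Claim_equal_birthday_count := by
  intro xs _
  unfold Spec_birthday_count
  rw [pvA_eq, pvB_eq]
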